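-- pv_equiv track=rewrite | github.com/kingkaushalagarwal/100daysofcoding | maximum_sum.py | solve
-- ===== SOURCE A (Python) =====
-- def solve(A, B, C, D):
--     arr3 = [x*D for x in A]
--     n = len(A)
--     for i in range(n-2,-1,-1):
--         arr3[i]=max(arr3[i],arr3[i+1])
--
--     for i in range(n):
--         arr3[i] += A[i]*C
--
--     for i in range(n-2,-1,-1):
--         arr3[i]=max(arr3[i],arr3[i+1])
--
--     for i in range(n):
--         arr3[i] += A[i]*B
--
--     return max(arr3)
-- ===== SOURCE B (Python) =====
-- def solve(A, B, C, D):
--     x0 = A[0]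
--     b1 = x0 * B
--     b2 = b1 + x0 * C
--     b3 = b2 + x0 * D
--     for x in A[1:]:
--         b1 = max(b1, x * B)
--         b2 = max(b2, b1 + x * C)
--         b3 = max(b3, b2 + x * D)
--     return b3
-- ===== Notes on version B (the rewrite author's own statement) =====
-- stated objective: simpler
-- what changed: Replaced A's three backward in-place array passes (suffix-max, add, suffix-max, add) plus a final max by a single forward scan keeping three running scalar maxima b1,b2,b3.
import Mathlib
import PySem

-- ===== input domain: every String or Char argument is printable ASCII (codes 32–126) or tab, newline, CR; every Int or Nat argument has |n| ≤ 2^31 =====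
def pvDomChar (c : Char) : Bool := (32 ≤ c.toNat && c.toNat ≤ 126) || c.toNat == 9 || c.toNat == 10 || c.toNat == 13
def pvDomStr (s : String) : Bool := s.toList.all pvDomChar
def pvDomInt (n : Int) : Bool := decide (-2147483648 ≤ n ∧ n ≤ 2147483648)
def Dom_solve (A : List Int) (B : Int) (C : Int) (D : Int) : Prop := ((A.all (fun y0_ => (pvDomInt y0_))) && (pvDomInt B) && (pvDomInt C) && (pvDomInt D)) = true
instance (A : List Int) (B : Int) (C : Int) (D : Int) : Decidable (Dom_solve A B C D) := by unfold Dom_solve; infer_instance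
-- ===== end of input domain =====

-- B replaces A's three backward/forward in-place array passes plus a final max by one forward
-- scan keeping three running scalar maxima (objective: simpler; O(1) extra space instead of O(n)).


-- ===== PORT A =====
-- literal transliteration of Source A: arr3 = [x*D for x in A], three in-place index loops
-- (suffix-max, += A[i]*C, suffix-max, += A[i]*B), then max(arr3)
def solve (A : List Int) (B : Int) (C : Int) (D : Int) : Int :=
  let arr3 := A.map (fun x => x * D)
  let n : Int := A.length
  let arr3 := (PySem.List.pyRange (n - 2) (-1) (-1)).foldl
    (fun a i => PySem.List.pySetD a i (max (PySem.List.pyGetD a i 0) (PySem.List.pyGetD a (i + 1) 0))) arr3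
  let arr3 := (PySem.List.pyRange 0 n 1).foldl
    (fun a i => PySem.List.pySetD a i (PySem.List.pyGetD a i 0 + PySem.List.pyGetD A i 0 * C)) arr3
  let arr3 := (PySem.List.pyRange (n - 2) (-1) (-1)).foldl
    (fun a i => PySem.List.pySetD a i (max (PySem.List.pyGetD a i 0) (PySem.List.pyGetD a (i + 1) 0))) arr3
  let arr3 := (PySem.List.pyRange 0 n 1).foldl
    (fun a i => PySem.List.pySetD a i (PySem.List.pyGetD a i 0 + PySem.List.pyGetD A i 0 * B)) arr3
  (PySem.List.max? arr3 (fun y => y)).getD 0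

-- ===== PORT B =====
-- literal transliteration of Source B: seed the three running maxima from A[0], one fold over A[1:]
def solve_alt (A : List Int) (B : Int) (C : Int) (D : Int) : Int :=
  let x0 := PySem.List.pyGetD A 0 0
  let b1 := x0 * B
  let b2 := b1 + x0 * C
  let b3 := b2 + x0 * D
  let s := (PySem.List.slice A (some 1) none).foldl
    (fun (st : Int × Int × Int) x =>
      let b1 := max st.1 (x * B)
      let b2 := max st.2.1 (b1 + x * C)
      let b3 := max st.2.2 (b2 + x * D)
      (b1, b2, b3)) (b1, b2, b3)
  s.2.2

-- ===== PRECONDITION & SPEC =====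
-- Pre_ excludes only the empty list, on which Python A raises ValueError (max() of an empty sequence).
def Pre_solve (A : List Int) (B : Int) (C : Int) (D : Int) : Prop := A ≠ []
instance (A : List Int) (B : Int) (C : Int) (D : Int) : Decidable (Pre_solve A B C D) := by unfold Pre_solve; infer_instance
def pvWitness_solve : List Int × Int × Int × Int := ([3, -1, 4], 2, -5, 7)
def Spec_solve (A : List Int) (B : Int) (C : Int) (D : Int) (out : Int) : Prop := out = solve_alt A B C D
instance (A : List Int) (B : Int) (C : Int) (D : Int) (out : Int) : Decidable (Spec_solve A B C D out) := by unfold Spec_solve; infer_instance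

-- ===== CLAIM (what is proved, stated in full; the proofs are below) =====
def Claim_equal_solve : Prop := ∀ (A : List Int) (B : Int) (C : Int) (D : Int), Dom_solve A B C D → Pre_solve A B C D → Spec_solve A B C D (solve A B C D)

-- ===== LEMMAS AND PROOFS =====

-- suffix-maximum rebuild of a list (what A's backward loops compute)
def sufm : List Int → List Int
  | [] => []
  | x :: xs =>
    match sufm xs with
    | [] => [x]
    | m :: t => max x m :: m :: t

-- Python max() of a nonempty list
def listMax : List Int → Int
  | [] => 0
  | x :: t => t.foldl max x

-- the six suffix statistics of a nonempty list under weights B, C, D: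
-- (max aᵢB, max aᵢC, max aᵢD, max aₜB+aᵢC (t≤i), max aⱼC+aₖD (j≤k), max aᵢB+aⱼC+aₖD (i≤j≤k))
def hexa (B C D : Int) : List Int → Int × Int × Int × Int × Int × Int
  | [] => (0, 0, 0, 0, 0, 0)
  | x :: xs =>
    match xs with
    | [] => (x * B, x * C, x * D, x * B + x * C, x * C + x * D, x * B + x * C + x * D)
    | y :: t =>
      let h := hexa B C D (y :: t)
      let p1 := max (x * B) h.1
      let q1 := max (x * C) h.2.1
      let r1 := max (x * D) h.2.2.1
      let p2 := max (x * B + q1) h.2.2.2.1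
      let q2 := max (x * C + r1) h.2.2.2.2.1
      let p3 := max (x * B + q2) h.2.2.2.2.2
      (p1, q1, r1, p2, q2, p3)

-- one step of A's backward suffix-max loops / one step of A's forward += loops
def sstep (a : List Int) (i : Int) : List Int :=
  PySem.List.pySetD a i (max (PySem.List.pyGetD a i 0) (PySem.List.pyGetD a (i + 1) 0))
def astep (A : List Int) (K : Int) (a : List Int) (i : Int) : List Int :=
  PySem.List.pySetD a i (PySem.List.pyGetD a i 0 + PySem.List.pyGetD A i 0 * K)
-- one step of B's forward fold
def fstep (B C D : Int) (st : Int × Int × Int) (x : Int) : Int × Int × Int :=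
  let b1 := max st.1 (x * B)
  let b2 := max st.2.1 (b1 + x * C)
  let b3 := max st.2.2 (b2 + x * D)
  (b1, b2, b3)

theorem sufm_length (a : List Int) : (sufm a).length = a.length := by
  induction a with
  | nil => rfl
  | cons x xs ih =>
    simp only [sufm]
    cases h : sufm xs with
    | nil => rw [h] at ih; simp only [List.length_cons, List.length_nil] at ih ⊢; omega
    | cons m t => rw [h] at ih; simp only [List.length_cons] at ih ⊢; omega

theorem sufm_ne_nil (a : List Int) (h : a ≠ []) : sufm a ≠ [] := by
  cases a with
  | nil => exact absurd rfl h
  | cons x xs => simp only [sufm]; cases sufm xs <;> simp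

theorem sufm_cons (x : Int) (xs : List Int) (h : xs ≠ []) :
    sufm (x :: xs) = max x ((sufm xs).headI) :: sufm xs := by
  simp only [sufm]
  cases hh : sufm xs with
  | nil => exact absurd hh (sufm_ne_nil xs h)
  | cons m t => simp [List.headI]

theorem sufm_short (a : List Int) (h : a.length ≤ 1) : sufm a = a := by
  match a, h with
  | [], _ => rfl
  | [x], _ => rfl

theorem pyGetD_cast_succ (L : List Int) (d : Int) (n : Nat) :
    PySem.List.pyGetD L ((n : Int) + 1) d = L.getD (n + 1) d := by
  rw [show ((n : Int) + 1) = ((n + 1 : Nat) : Int) by push_cast; ring, PySem.List.pyGetD_natCast]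

-- one sstep applied in the middle of a split list
theorem sstep_mid (P : List Int) (x m : Int) (t : List Int) :
    sstep (P ++ x :: m :: t) (P.length : Int) = P ++ max x m :: m :: t := by
  induction P with
  | nil => simp [sstep, pysem]
  | cons p P' ih =>
    simp only [sstep, pysem, List.length_cons, List.cons_append, pyGetD_cast_succ] at ih ⊢
    simp only [List.getD_cons_succ, List.set_cons_succ, List.cons.injEq]
    exact ⟨trivial, ih⟩

theorem getD_mid (P : List Int) (x d : Int) (t : List Int) :
    PySem.List.pyGetD (P ++ x :: t) (P.length : Int) d = x := by
  induction P with
  | nil => simp [pysem]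
  | cons p P' ih =>
    simp only [pysem, List.length_cons, List.cons_append, List.getD_cons_succ] at ih ⊢
    exact ih

theorem setD_mid (P : List Int) (x v : Int) (t : List Int) :
    PySem.List.pySetD (P ++ x :: t) (P.length : Int) v = P ++ v :: t := by
  induction P with
  | nil => simp [pysem]
  | cons p P' ih =>
    simp only [pysem, List.length_cons, List.cons_append, List.set_cons_succ, List.cons.injEq] at ih ⊢
    exact ⟨trivial, ih⟩

-- A's backward loop 'for i in range(n-2,-1,-1): a[i]=max(a[i],a[i+1])' computes sufm
theorem suf_loop_rev (a : List Int) (k : Nat) : ∀ (j : Nat), j + k = a.length - 1 → a ≠ [] →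
    ((PySem.List.pyRange (j : Int) ((a.length : Int) - 1) 1).reverse).foldl sstep a
      = a.take j ++ sufm (a.drop j) := by
  induction k with
  | zero =>
    intro j hk ha
    have hj : (a.length : Int) - 1 ≤ (j : Int) := by
      have : a.length ≠ 0 := fun h => ha (List.eq_nil_of_length_eq_zero h)
      omega
    rw [PySem.List.pyRange_one_eq_nil hj]
    simp only [List.reverse_nil, List.foldl_nil]
    have hdrop : (a.drop j).length ≤ 1 := by simp only [List.length_drop]; omega
    rw [sufm_short _ hdrop, List.take_append_drop]
  | succ k ih =>
    intro j hk ha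
    have hlen1 : 0 < a.length := List.length_pos_iff.mpr ha
    have hjlt : (j : Int) < (a.length : Int) - 1 := by omega
    rw [PySem.List.pyRange_one_cons hjlt,
      show ((j : Int) + 1) = ((j + 1 : Nat) : Int) by push_cast; ring]
    simp only [List.reverse_cons, List.foldl_append, List.foldl_cons, List.foldl_nil]
    rw [ih (j + 1) (by omega) ha]
    have hj1 : j + 1 < a.length := by omega
    have hdne : a.drop (j + 1) ≠ [] := by
      simp only [ne_eq, List.drop_eq_nil_iff]; omega
    obtain ⟨m, t, hmt⟩ : ∃ m t, sufm (a.drop (j + 1)) = m :: t := by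
      cases hs : sufm (a.drop (j + 1)) with
      | nil => exact absurd hs (sufm_ne_nil _ hdne)
      | cons m t => exact ⟨m, t, rfl⟩
    have htake : a.take (j + 1) = a.take j ++ [a[j]] := by
      rw [List.take_add_one, List.getElem?_eq_getElem (by omega)]; rfl
    have hPlen : (a.take j).length = j := List.length_take_of_le (by omega)
    rw [htake, hmt, List.append_assoc, List.singleton_append,
      show (j : Int) = ((a.take j).length : Int) by rw [hPlen], sstep_mid]
    have hdj : a.drop j = a[j] :: a.drop (j + 1) := List.drop_eq_getElem_cons (by omega)
    rw [hdj, sufm_cons _ _ hdne, hmt]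
    simp [List.headI]

theorem suf_loop (a : List Int) (h : a ≠ []) :
    (PySem.List.pyRange ((a.length : Int) - 2) (-1) (-1)).foldl sstep a = sufm a := by
  have := suf_loop_rev a (a.length - 1) 0 (by omega) h
  simp only [Nat.cast_zero, List.take_zero, List.drop_zero, List.nil_append] at this
  rw [PySem.List.pyRange_neg_one_eq_reverse,
    show ((a.length : Int) - 2 + 1) = (a.length : Int) - 1 by ring,
    show ((-1 : Int) + 1) = ((0 : Nat) : Int) by norm_num]
  exact this

-- A's forward loop 'for i in range(n): a[i] += A[i]*K' computes zipWith
theorem add_loop_fwd (A arr : List Int) (K : Int) (hlen : arr.length = A.length)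
    (k : Nat) : ∀ (j : Nat), j + k = A.length →
    (PySem.List.pyRange (j : Int) ((A.length : Int)) 1).foldl (astep A K)
      (List.zipWith (fun s x => s + x * K) (arr.take j) (A.take j) ++ arr.drop j)
      = List.zipWith (fun s x => s + x * K) arr A := by
  induction k with
  | zero =>
    intro j hk
    rw [PySem.List.pyRange_one_eq_nil (by omega)]
    simp only [List.foldl_nil]
    rw [List.take_of_length_le (by omega), List.take_of_length_le (by omega),
      List.drop_of_length_le (by omega), List.append_nil]
  | succ k ih =>
    intro j hk
    have hjA : j < A.length := by omega
    have hjar : j < arr.length := by omega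
    rw [PySem.List.pyRange_one_cons (by omega), List.foldl_cons,
      show ((j : Int) + 1) = ((j + 1 : Nat) : Int) by push_cast; ring]
    have hZ : (List.zipWith (fun s x => s + x * K) (arr.take j) (A.take j)).length = j := by
      simp only [List.length_zipWith, List.length_take]; omega
    have hdj : arr.drop j = arr[j] :: arr.drop (j + 1) := List.drop_eq_getElem_cons hjar
    have hstep : astep A K (List.zipWith (fun s x => s + x * K) (arr.take j) (A.take j) ++ arr.drop j) (j : Int)
        = List.zipWith (fun s x => s + x * K) (arr.take (j + 1)) (A.take (j + 1)) ++ arr.drop (j + 1) := by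
      unfold astep
      rw [hdj, show (j : Int) = ((List.zipWith (fun s x => s + x * K) (arr.take j) (A.take j)).length : Int) by rw [hZ],
        getD_mid, setD_mid, hZ, PySem.List.pyGetD_natCast, List.getD_eq_getElem _ _ hjA]
      rw [List.take_add_one, List.take_add_one,
        List.getElem?_eq_getElem hjar, List.getElem?_eq_getElem hjA]
      simp only [Option.toList_some]
      rw [List.zipWith_append (h := by simp only [List.length_take]; omega)]
      simp
    rw [hstep, ih (j + 1) (by omega)]

theorem add_loop (A arr : List Int) (K : Int) (hlen : arr.length = A.length) :
    (PySem.List.pyRange 0 ((A.length : Int)) 1).foldl (astep A K) arr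
      = List.zipWith (fun s x => s + x * K) arr A := by
  have := add_loop_fwd A arr K hlen A.length 0 (by omega)
  simpa using this

-- Python max() of a nonempty list, in PySem terms
theorem max_getD (l : List Int) (h : l ≠ []) :
    (PySem.List.max? l (fun y => y)).getD 0 = listMax l := by
  cases l with
  | nil => exact absurd rfl h
  | cons x t => rw [PySem.List.max?_id_cons]; rfl

theorem foldl_max_shift (t : List Int) : ∀ (a b : Int), t.foldl max (max a b) = max a (t.foldl max b) := by
  induction t with
  | nil => intro a b; rfl
  | cons z t ih => intro a b; rw [List.foldl_cons, List.foldl_cons, max_assoc, ih]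

theorem listMax_cons (x : Int) (l : List Int) (h : l ≠ []) :
    listMax (x :: l) = max x (listMax l) := by
  cases l with
  | nil => exact absurd rfl h
  | cons y t =>
    show (y :: t).foldl max x = max x (t.foldl max y)
    rw [List.foldl_cons, foldl_max_shift]

-- characterization of A's three arrays by the suffix statistics
theorem chain_spec (B C D : Int) (l : List Int) (h : l ≠ []) :
    (sufm (l.map (fun x => x * D))).headI = (hexa B C D l).2.2.1
    ∧ (sufm (List.zipWith (fun s x => s + x * C) (sufm (l.map (fun x => x * D))) l)).headI
        = (hexa B C D l).2.2.2.2.1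
    ∧ listMax (List.zipWith (fun s x => s + x * B)
        (sufm (List.zipWith (fun s x => s + x * C) (sufm (l.map (fun x => x * D))) l)) l)
        = (hexa B C D l).2.2.2.2.2 := by
  induction l with
  | nil => exact absurd rfl h
  | cons x xs ih =>
    cases xs with
    | nil =>
      refine ⟨rfl, ?_, ?_⟩ <;> simp [sufm, hexa, listMax] <;> ring
    | cons y t =>
      obtain ⟨ih1, ih2, ih3⟩ := ih (by simp)
      rcases h' : hexa B C D (y :: t) with ⟨p1, q1, r1, p2, q2, p3⟩
      rw [h'] at ih1 ih2 ih3
      have hx : hexa B C D (x :: y :: t)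
          = (max (x * B) p1, max (x * C) q1, max (x * D) r1,
             max (x * B + max (x * C) q1) p2, max (x * C + max (x * D) r1) q2,
             max (x * B + max (x * C + max (x * D) r1) q2) p3) := by
        simp only [hexa, h']
      rw [hx]
      have hmapne : (y :: t).map (fun x => x * D) ≠ [] := by simp
      have h1 : sufm ((x :: y :: t).map (fun x => x * D))
          = max (x * D) r1 :: sufm ((y :: t).map (fun x => x * D)) := by
        rw [List.map_cons, sufm_cons _ _ hmapne, ih1]
      have hzipne : List.zipWith (fun s x => s + x * C) (sufm ((y :: t).map (fun x => x * D))) (y :: t) ≠ [] := by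
        have hl : (sufm ((y :: t).map (fun x => x * D))).length = t.length + 1 := by
          rw [sufm_length]; simp
        intro hc
        have hlen0 := congrArg List.length hc
        rw [List.length_zipWith, hl] at hlen0
        simp at hlen0
      have h2 : List.zipWith (fun s x => s + x * C) (sufm ((x :: y :: t).map (fun x => x * D))) (x :: y :: t)
          = (max (x * D) r1 + x * C) :: List.zipWith (fun s x => s + x * C) (sufm ((y :: t).map (fun x => x * D))) (y :: t) := by
        rw [h1]; rfl
      have h3 : sufm (List.zipWith (fun s x => s + x * C) (sufm ((x :: y :: t).map (fun x => x * D))) (x :: y :: t))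
          = max (max (x * D) r1 + x * C) q2
            :: sufm (List.zipWith (fun s x => s + x * C) (sufm ((y :: t).map (fun x => x * D))) (y :: t)) := by
        rw [h2, sufm_cons _ _ hzipne, ih2]
      have hzipne2 : List.zipWith (fun s x => s + x * B)
          (sufm (List.zipWith (fun s x => s + x * C) (sufm ((y :: t).map (fun x => x * D))) (y :: t))) (y :: t) ≠ [] := by
        intro hc
        have hl1 : (sufm (List.zipWith (fun s x => s + x * C) (sufm ((y :: t).map (fun x => x * D))) (y :: t))).length = t.length + 1 := by
          rw [sufm_length]
          simp [List.length_zipWith, sufm_length]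
        have := congrArg List.length hc
        rw [List.length_zipWith, hl1] at this
        simp at this
      refine ⟨?_, ?_, ?_⟩
      · rw [h1]; rfl
      · rw [h3]
        simp only [List.headI]
        rw [show max (x * D) r1 + x * C = x * C + max (x * D) r1 by ring]
      · rw [h3,
          show List.zipWith (fun s x => s + x * B)
            (max (max (x * D) r1 + x * C) q2 :: sufm (List.zipWith (fun s x => s + x * C) (sufm ((y :: t).map (fun x => x * D))) (y :: t))) (x :: y :: t)
            = (max (max (x * D) r1 + x * C) q2 + x * B)
              :: List.zipWith (fun s x => s + x * B)
                (sufm (List.zipWith (fun s x => s + x * C) (sufm ((y :: t).map (fun x => x * D))) (y :: t))) (y :: t) from rfl,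
          listMax_cons _ _ hzipne2, ih3]
        rw [show max (max (x * D) r1 + x * C) q2 + x * B = x * B + max (x * C + max (x * D) r1) q2 by
          rw [show max (x * D) r1 + x * C = x * C + max (x * D) r1 by ring]; ring]

-- B's forward fold with a generic seed, in terms of the suffix statistics
theorem fold_spec (B C D : Int) (l : List Int) (h : l ≠ []) (b1 b2 b3 : Int) :
    l.foldl (fstep B C D) (b1, b2, b3)
    = (max b1 (hexa B C D l).1,
       max b2 (max (b1 + (hexa B C D l).2.1) (hexa B C D l).2.2.2.1),
       max b3 (max (b2 + (hexa B C D l).2.2.1)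
         (max (b1 + (hexa B C D l).2.2.2.2.1) (hexa B C D l).2.2.2.2.2))) := by
  induction l generalizing b1 b2 b3 with
  | nil => exact absurd rfl h
  | cons x xs ih =>
    cases xs with
    | nil =>
      simp only [List.foldl, hexa, fstep, Prod.mk.injEq]
      generalize x * B = u
      generalize x * C = v
      generalize x * D = w
      refine ⟨?_, ?_, ?_⟩ <;> (try simp only [max_add (α := ℤ), add_max (α := ℤ)]) <;>
        (first | trivial | simp only [max_comm, max_left_comm, max_assoc, add_comm, add_left_comm, add_assoc] | omega)
    | cons y t =>
      rcases h' : hexa B C D (y :: t) with ⟨p1, q1, r1, p2, q2, p3⟩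
      have hx : hexa B C D (x :: y :: t)
          = (max (x * B) p1, max (x * C) q1, max (x * D) r1,
             max (x * B + max (x * C) q1) p2, max (x * C + max (x * D) r1) q2,
             max (x * B + max (x * C + max (x * D) r1) q2) p3) := by
        simp only [hexa, h']
      rw [List.foldl_cons,
        show fstep B C D (b1, b2, b3) x
          = (max b1 (x * B), max b2 (max b1 (x * B) + x * C),
             max b3 (max b2 (max b1 (x * B) + x * C) + x * D)) from rfl,
        ih (by simp), h', hx]
      simp only [Prod.mk.injEq]
      generalize x * B = u
      generalize x * C = v
      generalize x * D = w
      clear ih h' hx h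
      refine ⟨?_, ?_, ?_⟩
      all_goals (try simp only [max_add (α := ℤ), add_max (α := ℤ)])
      all_goals (first | trivial | simp only [max_comm, max_left_comm, max_assoc, add_comm, add_left_comm, add_assoc] | omega)

theorem suf_loop' (a : List Int) (m : Int) (hm : m = (a.length : Int)) (h : a ≠ []) :
    (PySem.List.pyRange (m - 2) (-1) (-1)).foldl sstep a = sufm a := by
  rw [hm]; exact suf_loop a h

theorem add_loop' (A arr : List Int) (K m : Int) (hm : m = (A.length : Int))
    (hlen : arr.length = A.length) :
    (PySem.List.pyRange 0 m 1).foldl (astep A K) arr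
      = List.zipWith (fun s x => s + x * K) arr A := by
  rw [hm]; exact add_loop A arr K hlen

-- ===== VERDICT (by name: the statement is the Claim_ definition above) =====
theorem solve_spec : Claim_equal_solve := by
  unfold Claim_equal_solve
  intro A B C D _ hpre
  unfold Spec_solve
  unfold Pre_solve at hpre
  obtain ⟨x, xs, rfl⟩ : ∃ x xs, A = x :: xs := by
    cases A with
    | nil => exact absurd rfl hpre
    | cons a b => exact ⟨a, b, rfl⟩
  unfold solve solve_alt
  dsimp only
  have hx0 : PySem.List.pyGetD (x :: xs) 0 0 = x := by simp [pysem]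
  have hsl : PySem.List.slice (x :: xs) (some 1) none = xs := by
    rw [PySem.List.slice_from_one]; rfl
  have ef : (fun (st : Int × Int × Int) (x : Int) =>
      (max st.1 (x * B), max st.2.1 (max st.1 (x * B) + x * C),
        max st.2.2 (max st.2.1 (max st.1 (x * B) + x * C) + x * D))) = fstep B C D := rfl
  have es : (fun (a : List Int) (i : Int) =>
      PySem.List.pySetD a i (max (PySem.List.pyGetD a i 0) (PySem.List.pyGetD a (i + 1) 0))) = sstep := rfl
  have eaC : (fun (a : List Int) (i : Int) =>
      PySem.List.pySetD a i (PySem.List.pyGetD a i 0 + PySem.List.pyGetD (x :: xs) i 0 * C)) = astep (x :: xs) C := rfl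
  have eaB : (fun (a : List Int) (i : Int) =>
      PySem.List.pySetD a i (PySem.List.pyGetD a i 0 + PySem.List.pyGetD (x :: xs) i 0 * B)) = astep (x :: xs) B := rfl
  rw [hx0, hsl, ef, es, eaC, eaB]
  have hL0len : ((x :: xs).map (fun x => x * D)).length = (x :: xs).length := by simp
  rw [suf_loop' ((x :: xs).map (fun x => x * D)) (((x :: xs).length : Int))
    (by rw [hL0len]) (by simp)]
  have hs1len : (sufm ((x :: xs).map (fun x => x * D))).length = (x :: xs).length := by
    rw [sufm_length, hL0len]
  rw [add_loop' (x :: xs) (sufm ((x :: xs).map (fun x => x * D))) C (((x :: xs).length : Int)) rfl hs1len]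
  have hZ2len : (List.zipWith (fun s x => s + x * C) (sufm ((x :: xs).map (fun x => x * D))) (x :: xs)).length
      = (x :: xs).length := by
    rw [List.length_zipWith, hs1len, Nat.min_self]
  have hZ2ne : List.zipWith (fun s x => s + x * C) (sufm ((x :: xs).map (fun x => x * D))) (x :: xs) ≠ [] := by
    intro hc; have := congrArg List.length hc; rw [hZ2len] at this; simp at this
  rw [suf_loop' _ (((x :: xs).length : Int)) (by rw [hZ2len]) hZ2ne]
  have hs2len : (sufm (List.zipWith (fun s x => s + x * C) (sufm ((x :: xs).map (fun x => x * D))) (x :: xs))).length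
      = (x :: xs).length := by rw [sufm_length, hZ2len]
  rw [add_loop' (x :: xs) _ B (((x :: xs).length : Int)) rfl hs2len]
  have hFne : List.zipWith (fun s x => s + x * B)
      (sufm (List.zipWith (fun s x => s + x * C) (sufm ((x :: xs).map (fun x => x * D))) (x :: xs))) (x :: xs) ≠ [] := by
    intro hc; have := congrArg List.length hc
    rw [List.length_zipWith, hs2len, Nat.min_self] at this; simp at this
  rw [max_getD _ hFne, (chain_spec B C D (x :: xs) hpre).2.2]
  cases xs with
  | nil =>
    simp only [List.foldl_nil, hexa]
    try ring
  | cons y t =>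
    rw [fold_spec B C D (y :: t) (by simp)]
    rcases h' : hexa B C D (y :: t) with ⟨p1, q1, r1, p2, q2, p3⟩
    have hx : hexa B C D (x :: y :: t)
        = (max (x * B) p1, max (x * C) q1, max (x * D) r1,
           max (x * B + max (x * C) q1) p2, max (x * C + max (x * D) r1) q2,
           max (x * B + max (x * C + max (x * D) r1) q2) p3) := by
      simp only [hexa, h']
    rw [hx]
    dsimp only
    generalize x * B = u
    generalize x * C = v
    generalize x * D = w
    clear hpre h' hx
    omega
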